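-- pv_equiv track=rewrite | github.com/frednefu/RaelTimeTrans | translation/term_manager.py | convert_phonetic_callsign
-- ===== SOURCE A (Python) =====
-- def convert_phonetic_callsign(text):
--     """
--     将字母解释法呼号转换为标准呼号，仅在连续出现两个或以上的字母解释法单词时才进行转换。
--     例如：'Bravo Golf two alpha yankee kilo' -> 'BG2AYK'，但单独的'Golf'或'Alpha'保持不变
--     """
--     if not text:
--         return text
--
--     phonetic_map = {
--         'alpha': 'A', 'bravo': 'B', 'charlie': 'C', 'delta': 'D', 'echo': 'E',
--         'foxtrot': 'F', 'golf': 'G', 'hotel': 'H', 'india': 'I', 'juliet': 'J',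
--         'kilo': 'K', 'lima': 'L', 'mike': 'M', 'november': 'N', 'oscar': 'O',
--         'papa': 'P', 'quebec': 'Q', 'romeo': 'R', 'sierra': 'S', 'tango': 'T',
--         'uniform': 'U', 'victor': 'V', 'whiskey': 'W', 'xray': 'X', 'yankee': 'Y',
--         'zulu': 'Z', 'zero': '0', 'one': '1', 'two': '2', 'three': '3',
--         'four': '4', 'five': '5', 'six': '6', 'seven': '7', 'eight': '8', 'nine': '9'
--     }
--
--     # 将文本分割成单词
--     words = text.lower().split()
--     result = []
--     i = 0
--
--     # 简化版本：只处理连续的字母解释法单词，避免可能的无限循环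
--     while i < len(words):
--         word = words[i]
--
--         # 检查当前单词是否是字母解释法
--         if word in phonetic_map:
--             # 寻找连续的字母解释法单词
--             j = i + 1
--             consecutive_count = 1
--             phonetic_sequence = [phonetic_map[word]]
--
--             while j < len(words) and words[j] in phonetic_map:
--                 phonetic_sequence.append(phonetic_map[words[j]])
--                 consecutive_count += 1
--                 j += 1
--
--             # 仅当连续出现两个或以上的字母解释法单词时才转换
--             if consecutive_count >= 2:
--                 callsign = ''.join(phonetic_sequence).upper()
--                 result.append(callsign)
--                 i = j  # 跳过已处理的单词
--             else:
--                 # 单独的字母解释法单词保持原样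
--                 result.append(word)
--                 i += 1
--         else:
--             # 其他单词直接添加
--             result.append(word)
--             i += 1
--
--     return ' '.join(result)
-- ===== SOURCE B (Python) =====
-- _PHONETIC_MAP = {
--     'alpha': 'A', 'bravo': 'B', 'charlie': 'C', 'delta': 'D', 'echo': 'E',
--     'foxtrot': 'F', 'golf': 'G', 'hotel': 'H', 'india': 'I', 'juliet': 'J',
--     'kilo': 'K', 'lima': 'L', 'mike': 'M', 'november': 'N', 'oscar': 'O',
--     'papa': 'P', 'quebec': 'Q', 'romeo': 'R', 'sierra': 'S', 'tango': 'T',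
--     'uniform': 'U', 'victor': 'V', 'whiskey': 'W', 'xray': 'X', 'yankee': 'Y',
--     'zulu': 'Z', 'zero': '0', 'one': '1', 'two': '2', 'three': '3',
--     'four': '4', 'five': '5', 'six': '6', 'seven': '7', 'eight': '8', 'nine': '9'
-- }
--
--
-- def _flush(out, run):
--     """Emit a pending run of phonetic words: two or more become one callsign,
--     a single one stays as the (lowercased) word itself."""
--     if len(run) >= 2:
--         out.append(''.join(_PHONETIC_MAP[w] for w in run))
--     elif run:
--         out.append(run[0])
--
--
-- def convert_phonetic_callsign(text):
--     if not text:
--         return text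
--     out = []
--     run = []  # pending consecutive phonetic words (invariant: all are map keys)
--     for w in text.lower().split():
--         if w in _PHONETIC_MAP:
--             run.append(w)
--         else:
--             _flush(out, run)
--             run = []
--             out.append(w)
--     _flush(out, run)
--     return ' '.join(out)
-- ===== Notes on version B (the rewrite author's own statement) =====
-- stated objective: simpler
-- what changed: Replaced A's nested index-based lookahead (outer while over i with an inner j-scan and an index jump) by a single left-to-right pass that accumulates the pending run of consecutive phonetic words and flushes it (callsign if length >= 2, the word itself if 1) on each non-phonetic word and at the end.
import Mathlib
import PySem

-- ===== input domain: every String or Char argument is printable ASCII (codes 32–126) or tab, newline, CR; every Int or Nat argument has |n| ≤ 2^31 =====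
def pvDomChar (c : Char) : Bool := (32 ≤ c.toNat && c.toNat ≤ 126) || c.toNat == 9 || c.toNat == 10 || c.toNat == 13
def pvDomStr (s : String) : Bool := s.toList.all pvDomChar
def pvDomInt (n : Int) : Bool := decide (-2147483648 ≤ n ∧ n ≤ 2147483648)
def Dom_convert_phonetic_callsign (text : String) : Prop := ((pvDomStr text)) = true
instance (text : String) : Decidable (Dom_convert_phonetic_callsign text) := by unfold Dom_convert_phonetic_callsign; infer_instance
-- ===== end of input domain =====

set_option maxRecDepth 4096


-- B replaces A's index-based lookahead (i/j scans) by a single left-to-right pass that keeps the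
-- pending run of phonetic words in an accumulator and flushes it on each non-phonetic word; same
-- values everywhere (objective: simpler).

-- shared module constant: the phonetic alphabet dict literal
def phoneticMap : PySem.Dict String String := PySem.Dict.ofList
  [("alpha", "A"), ("bravo", "B"), ("charlie", "C"), ("delta", "D"), ("echo", "E"),
   ("foxtrot", "F"), ("golf", "G"), ("hotel", "H"), ("india", "I"), ("juliet", "J"),
   ("kilo", "K"), ("lima", "L"), ("mike", "M"), ("november", "N"), ("oscar", "O"),
   ("papa", "P"), ("quebec", "Q"), ("romeo", "R"), ("sierra", "S"), ("tango", "T"),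
   ("uniform", "U"), ("victor", "V"), ("whiskey", "W"), ("xray", "X"), ("yankee", "Y"),
   ("zulu", "Z"), ("zero", "0"), ("one", "1"), ("two", "2"), ("three", "3"),
   ("four", "4"), ("five", "5"), ("six", "6"), ("seven", "7"), ("eight", "8"), ("nine", "9")]

-- ===== PORT A =====
-- inner while loop: collect the map values of the consecutive phonetic words, return the rest
def aGather : List String → List String × List String
  | [] => ([], [])
  | w :: rest =>
    match PySem.Dict.get? phoneticMap w with
    | some v =>
      let sr := aGather rest
      (v :: sr.1, sr.2)
    | none => ([], w :: rest)

-- termination fact for the outer loop (i = j skips at most the rest of the list)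
lemma aGather_snd_length_le : ∀ ws : List String, (aGather ws).2.length ≤ ws.length
  | [] => by simp [aGather]
  | w :: rest => by
    simp only [aGather]
    cases h : PySem.Dict.get? phoneticMap w with
    | some v =>
      have := aGather_snd_length_le rest
      simpa using Nat.le_succ_of_le this
    | none => simp

-- outer while loop over the word list
def aLoop : List String → List String
  | [] => []
  | w :: rest =>
    match PySem.Dict.get? phoneticMap w with
    | some v =>
      let sr := aGather rest
      if 1 + sr.1.length ≥ 2 then
        PySem.Str.upper (PySem.Str.join "" (v :: sr.1)) :: aLoop sr.2
      else
        w :: aLoop rest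
    | none => w :: aLoop rest
termination_by ws => ws.length
decreasing_by
  all_goals
    have := aGather_snd_length_le rest
    simp only [List.length_cons]
    omega

def convert_phonetic_callsign (text : String) : String :=
  if text = "" then text
  else PySem.Str.join " " (aLoop (PySem.Str.split₀ (PySem.Str.lower text)))

-- ===== PORT B =====
-- _PHONETIC_MAP[w]: only reached for words of a run, which are map keys, so get? is some and getD "" is exact there
def bVal (w : String) : String := (PySem.Dict.get? phoneticMap w).getD ""

def bFlush (out run : List String) : List String :=
  if run.length ≥ 2 then out ++ [PySem.Str.join "" (run.map bVal)]
  else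
    match run with
    | [] => out
    | w :: _ => out ++ [w]

def bStep (st : List String × List String) (w : String) : List String × List String :=
  if PySem.Dict.contains phoneticMap w then (st.1, st.2 ++ [w])
  else (bFlush st.1 st.2 ++ [w], [])

def convert_phonetic_callsign_alt (text : String) : String :=
  if text = "" then text
  else
    let st := (PySem.Str.split₀ (PySem.Str.lower text)).foldl bStep ([], [])
    PySem.Str.join " " (bFlush st.1 st.2)

-- ===== PRECONDITION & SPEC =====
def Spec_convert_phonetic_callsign (text : String) (out : String) : Prop := out = convert_phonetic_callsign_alt text
instance (text : String) (out : String) : Decidable (Spec_convert_phonetic_callsign text out) := by unfold Spec_convert_phonetic_callsign; infer_instance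

-- ===== CLAIM (what is proved, stated in full; the proofs are below) =====
def Claim_equal_convert_phonetic_callsign : Prop := ∀ (text : String), Dom_convert_phonetic_callsign text → Spec_convert_phonetic_callsign text (convert_phonetic_callsign text)

-- ===== LEMMAS AND PROOFS =====

-- predicate "word is phonetic" used to describe both loops
def isPh (w : String) : Bool := (PySem.Dict.get? phoneticMap w).isSome

lemma intercalate_nil_eq_flatten (xs : List (List Char)) : List.intercalate [] xs = xs.flatten := by
  induction xs with
  | nil => simp [List.intercalate]
  | cons a t ih => cases t <;> simp_all [List.intercalate, List.intersperse]

-- every value of the dict literal is already uppercase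
lemma values_upper_fixed : phoneticMap.values.all (fun v => PySem.Str.upper v == v) = true := by decide

lemma upper_bVal_fixed (w : String) (h : isPh w = true) : PySem.Str.upper (bVal w) = bVal w := by
  simp only [isPh, Option.isSome_iff_exists] at h
  obtain ⟨v, hv⟩ := h
  have hm : (w, v) ∈ phoneticMap.items := PySem.Dict.mem_items_of_get?_eq_some phoneticMap hv
  have hvv : v ∈ phoneticMap.values := by
    simp only [PySem.Dict.values]
    exact List.mem_map.2 ⟨(w, v), hm, rfl⟩
  have := List.all_eq_true.1 values_upper_fixed v hvv
  simp only [beq_iff_eq] at this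
  simp [bVal, hv, this]

lemma upper_join_run (run : List String) (h : ∀ u ∈ run, isPh u = true) :
    PySem.Str.upper (PySem.Str.join "" (run.map bVal)) = PySem.Str.join "" (run.map bVal) := by
  apply String.toList_injective
  simp only [PySem.Str.toList_upper, PySem.Str.toList_join]
  have hsep : ("" : String).toList = ([] : List Char) := rfl
  rw [hsep]
  simp only [PySem.Chars.join, intercalate_nil_eq_flatten]
  have hup : PySem.Chars.upper = List.map PySem.Chars.upperChar := rfl
  rw [hup, List.map_flatten]
  congr 1
  simp only [List.map_map]
  apply List.map_congr_left
  intro u hu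
  have h1 : PySem.Str.upper (bVal u) = bVal u := upper_bVal_fixed u (h u hu)
  have h2 := congrArg String.toList h1
  rw [PySem.Str.toList_upper, hup] at h2
  simpa using h2

-- A's gather = (mapped takeWhile, dropWhile) of the phonetic prefix
lemma aGather_eq (ws : List String) :
    aGather ws = ((ws.takeWhile isPh).map bVal, ws.dropWhile isPh) := by
  induction ws with
  | nil => simp [aGather]
  | cons w rest ih =>
    simp only [aGather]
    cases h : PySem.Dict.get? phoneticMap w with
    | some v =>
      have hph : isPh w = true := by simp [isPh, h]
      simp [ih, hph, bVal, h]
    | none =>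
      have hph : isPh w = false := by simp [isPh, h]
      simp [hph]

-- flushing the phonetic prefix then running A on the rest is just A on the whole list
lemma flush_prefix (ws : List String) (pre : List String) :
    bFlush pre (ws.takeWhile isPh) ++ aLoop (ws.dropWhile isPh) = pre ++ aLoop ws := by
  cases ws with
  | nil => simp [bFlush]
  | cons w rest =>
    cases hph : isPh w with
    | false => simp [hph, bFlush]
    | true =>
      obtain ⟨v, hv⟩ : ∃ v, PySem.Dict.get? phoneticMap w = some v := by
        simpa [isPh, Option.isSome_iff_exists] using hph
      simp only [List.takeWhile_cons, List.dropWhile_cons, hph, if_true]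
      cases htw : rest.takeWhile isPh with
      | nil =>
        have hdw : rest.dropWhile isPh = rest := by
          have := @List.takeWhile_append_dropWhile _ isPh rest
          rw [htw] at this; simpa using this
        rw [hdw]
        have hA : aLoop (w :: rest) = w :: aLoop rest := by
          rw [aLoop.eq_def]
          simp [hv, aGather_eq, htw]
        rw [hA]
        simp [bFlush]
      | cons p ps =>
        have hA : aLoop (w :: rest) =
            PySem.Str.upper (PySem.Str.join "" ((w :: rest.takeWhile isPh).map bVal)) ::
              aLoop (rest.dropWhile isPh) := by
          rw [aLoop.eq_def]
          have hvb : bVal w = v := by simp [bVal, hv]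
          simp [hv, aGather_eq, htw, hvb]
        rw [hA]
        have hrun : ∀ u ∈ w :: rest.takeWhile isPh, isPh u = true := by
          intro u hu
          rcases List.mem_cons.1 hu with h1 | h1
          · simpa [h1] using hph
          · exact List.mem_takeWhile_imp h1
        rw [upper_join_run _ hrun]
        simp [bFlush, htw]

-- B's fold with a pending run, described by A's loop
lemma fold_run (ws : List String) (pre run : List String) :
    (let st := ws.foldl bStep (pre, run); bFlush st.1 st.2) =
      bFlush pre (run ++ ws.takeWhile isPh) ++ aLoop (ws.dropWhile isPh) := by
  induction ws generalizing pre run with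
  | nil => simp [aLoop]
  | cons w rest ih =>
    simp only [List.foldl_cons, bStep, PySem.Dict.contains_eq_isSome_get?]
    cases h : PySem.Dict.get? phoneticMap w with
    | some v =>
      have hph : isPh w = true := by simp [isPh, h]
      simpa [hph, List.takeWhile_cons, List.dropWhile_cons, List.append_assoc] using ih pre (run ++ [w])
    | none =>
      have hph : isPh w = false := by simp [isPh, h]
      simp only [Option.isSome_none, Bool.false_eq_true, if_false]
      have := ih (bFlush pre run ++ [w]) []
      simp only [List.nil_append] at this
      rw [this, flush_prefix rest (bFlush pre run ++ [w])]
      simp only [hph, List.takeWhile_cons, List.dropWhile_cons, Bool.false_eq_true, if_false]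
      have hw : aLoop (w :: rest) = w :: aLoop rest := by
        conv_lhs => rw [aLoop.eq_def]
        simp [h]
      rw [hw]
      simp

-- ===== VERDICT (by name: the statement is the Claim_ definition above) =====
theorem convert_phonetic_callsign_spec : Claim_equal_convert_phonetic_callsign := by
  intro text _
  unfold Spec_convert_phonetic_callsign convert_phonetic_callsign convert_phonetic_callsign_alt
  by_cases h : text = ""
  · simp [h]
  · simp only [h, if_false]
    have := fold_run (PySem.Str.split₀ (PySem.Str.lower text)) [] []
    simp only [List.nil_append] at this
    rw [this, flush_prefix (PySem.Str.split₀ (PySem.Str.lower text)) []]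
    simp
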